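-- pv_equiv track=rewrite | github.com/BenLeong0/leetcode_etc | google_foobar/question5.1.py | solution
-- ===== SOURCE A (Python) =====
-- from collections import defaultdict
--
-- def solution(g):
--     # Transpose if longer than wide
--     if len(g[0]) > len(g):
--         g = [[g[i][j] for i in range(len(g))] for j in range(len(g[0]))]
--
--     width, height = len(g[0]), len(g)
--
--     def check(row_id,i,j):
--         will_gas = (curr_grid[i][j]+curr_grid[i-1][j]+curr_grid[i][j-1]+curr_grid[i-1][j-1] == 1)
--         is_gas = g[row_id][j-1]
--         if (will_gas and is_gas) or ((not will_gas) and (not is_gas)):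
--             return True
--         return False
--
--     def backtrack(row_id,i=0,j=0):
--         if j == width+1:
--             a = convert_from_binary(curr_grid[0])
--             b = convert_from_binary(curr_grid[1])
--             curr_states[b] += prev_states[a]
--         elif (i,j) == (0,0):
--             backtrack(row_id,1,0)
--             curr_grid[i][j] = 0
--             backtrack(row_id,1,0)
--         elif (i,j) == (1,0):
--             backtrack(row_id,0,1)
--             curr_grid[i][j] = 0
--             backtrack(row_id,0,1)
--             curr_grid[i][j] = 1
--         elif i == 0:
--             backtrack(row_id,1,j)
--             curr_grid[i][j] = 0
--             backtrack(row_id,1,j)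
--             curr_grid[i][j] = 1
--         else:
--             if check(row_id,i,j):
--                 backtrack(row_id,0,j+1)
--             curr_grid[i][j] = 0
--             if check(row_id,i,j):
--                 backtrack(row_id,0,j+1)
--             curr_grid[i][j] = 1
--
--
--
--     def convert_from_binary(row):
--         return sum([value * 2**key for key,value in enumerate(row)])
--
--     prev_states = {key:1 for key in range(2**(width+1))}
--     for i in range(height):
--         curr_grid = [[1]*(width+1) for _ in range(2)]
--         curr_states = defaultdict(int)
--         backtrack(i)
--         prev_states=curr_states
--
--     return sum(prev_states.values())
-- ===== SOURCE B (Python) =====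
-- def solution(g):
--     # Transpose if longer than wide (zip truncates to the shortest row;
--     # on inputs where A returns normally this matches A's comprehension transpose)
--     if len(g[0]) > len(g):
--         g = [list(col) for col in zip(*g)]
--
--     width = len(g[0])
--     n = 2 ** (width + 1)
--
--     prev = [1] * n
--     for row in g:
--         curr = [0] * n
--         for a in range(n):
--             for b in range(n):
--                 ok = True
--                 for j in range(1, width + 1):
--                     s = ((a >> (j - 1)) & 1) + ((a >> j) & 1) \
--                         + ((b >> (j - 1)) & 1) + ((b >> j) & 1)
--                     if (s == 1) != bool(row[j - 1]):
--                         ok = False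
--                         break
--                 if ok:
--                     curr[b] += prev[a]
--         prev = curr
--     return sum(prev)
-- ===== Notes on version B (the rewrite author's own statement) =====
-- stated objective: simpler
-- what changed: The mutable 2-row-grid cell-by-cell backtracking with binary re-conversion at the leaves and a defaultdict accumulator is replaced by a direct double loop over all pairs of (width+1)-bit masks (a, b), validating each pair with one pass over the columns and accumulating curr[b] += prev[a] into a plain list; same outer row DP, transpose and padding convention.
import Mathlib
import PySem

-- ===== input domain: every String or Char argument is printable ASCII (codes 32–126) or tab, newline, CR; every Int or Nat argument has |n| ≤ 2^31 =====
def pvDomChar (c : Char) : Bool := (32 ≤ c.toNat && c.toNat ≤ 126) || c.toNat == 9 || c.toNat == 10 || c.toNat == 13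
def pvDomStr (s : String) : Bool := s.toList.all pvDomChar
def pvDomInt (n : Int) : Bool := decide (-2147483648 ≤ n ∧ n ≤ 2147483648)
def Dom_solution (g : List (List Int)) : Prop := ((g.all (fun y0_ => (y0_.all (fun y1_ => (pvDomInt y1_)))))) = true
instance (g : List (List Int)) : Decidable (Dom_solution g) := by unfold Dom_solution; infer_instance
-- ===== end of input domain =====

-- One honest line: B replaces A's mutable-grid backtracking by a plain double loop over
-- bit-mask pairs with a per-column validity test (simpler, not faster); return values only.

-- ===== PORT A =====
-- convert_from_binary(row) = sum(value * 2**key for key, value in enumerate(row))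
-- (keys of enumerate are nonnegative, so 2**key is ported as 2 ^ key.toNat)
def Aconv (row : List Int) : Int :=
  ((PySem.List.enumerate row).map (fun p => p.2 * 2 ^ p.1.toNat)).sum

-- check(row_id, 1, j): indices j ≥ 1 are in range on every reached state, so the
-- in-range reads curr_grid[i][j] / g[row_id][j-1] are ported with getD (exact here).
def Acheck (gp : List (List Int)) (r : Nat) (c0 c1 : List Int) (j : Nat) : Bool :=
  let willGas : Bool := (c1.getD j 0 + c0.getD j 0 + c1.getD (j-1) 0 + c0.getD (j-1) 0) == (1 : Int)
  let isGas : Bool := (gp.getD r []).getD (j-1) 0 != 0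
  if (willGas && isGas) || (!willGas && !isGas) then true else false

-- backtrack(row_id, i, j): the mutable curr_grid = [row0, row1] is threaded through as the
-- pair (c0, c1) (mutations persist across the sibling recursive calls exactly as in Python);
-- curr_states is threaded as cs.  The recursion is made total by a fuel parameter; the
-- Python recursion depth from (0,0) is 2*(w+1)+1, so fuel 2*w+6 never runs out.
def Abt (gp : List (List Int)) (w : Nat) (ps : PySem.Dict Int Int) (r : Nat) :
    Nat → Nat → Nat → List Int → List Int → PySem.Dict Int Int →
    (List Int × List Int × PySem.Dict Int Int)
  | 0, _, _, c0, c1, cs => (c0, c1, cs)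
  | (fuel+1), i, j, c0, c1, cs =>
    if j = w + 1 then
      -- curr_states[b] += prev_states[a]: defaultdict read is getD (first prev dict
      -- has every reachable key a, later ones are defaultdict(int))
      let a := Aconv c0
      let b := Aconv c1
      (c0, c1, cs.insert b (cs.getD b 0 + ps.getD a 0))
    else if i = 0 ∧ j = 0 then
      let r1 := Abt gp w ps r fuel 1 0 c0 c1 cs
      Abt gp w ps r fuel 1 0 (r1.1.set 0 0) r1.2.1 r1.2.2
    else if i = 1 ∧ j = 0 then
      let r1 := Abt gp w ps r fuel 0 1 c0 c1 cs
      let r2 := Abt gp w ps r fuel 0 1 r1.1 (r1.2.1.set 0 0) r1.2.2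
      (r2.1, r2.2.1.set 0 1, r2.2.2)
    else if i = 0 then
      let r1 := Abt gp w ps r fuel 1 j c0 c1 cs
      let r2 := Abt gp w ps r fuel 1 j (r1.1.set j 0) r1.2.1 r1.2.2
      (r2.1.set j 1, r2.2.1, r2.2.2)
    else
      let r1 := if Acheck gp r c0 c1 j then Abt gp w ps r fuel 0 (j+1) c0 c1 cs
                else (c0, c1, cs)
      let r2 := if Acheck gp r r1.1 (r1.2.1.set j 0) j then
                  Abt gp w ps r fuel 0 (j+1) r1.1 (r1.2.1.set j 0) r1.2.2
                else (r1.1, r1.2.1.set j 0, r1.2.2)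
      (r2.1, r2.2.1.set j 1, r2.2.2)

-- solution(g); loop indices i, j of the comprehensions/range loops are nonnegative,
-- ported over List.range with getD for the (in-range on admitted inputs) reads.
def solution (g : List (List Int)) : Int :=
  let gp := if g.headI.length > g.length then
      (List.range g.headI.length).map (fun j => (List.range g.length).map (fun i => (g.getD i []).getD j 0))
    else g
  let w := gp.headI.length
  let h := gp.length
  let ps0 := (List.range (2^(w+1))).foldl (fun d k => d.insert ((k : Nat) : Int) 1) PySem.Dict.empty
  let fin := (List.range h).foldl (fun ps i =>
      (Abt gp w ps i (2*w+6) 0 0 (List.replicate (w+1) 1) (List.replicate (w+1) 1) PySem.Dict.empty).2.2) ps0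
  fin.values.sum

-- ===== PORT B =====
-- literal transliteration of Source B: transpose-by-zip, then for each row a double loop
-- over masks a, b < 2^(width+1) with an all-columns validity test (break = List.all).
def solution_alt (g : List (List Int)) : Int :=
  let gp := if g.headI.length > g.length then
      (List.range ((g.map List.length).min?.getD 0)).map (fun j => g.map (fun row => row.getD j 0))
    else g
  let w := gp.headI.length
  let n := 2 ^ (w + 1)
  let fin := gp.foldl (fun prev row =>
      (List.range n).foldl (fun curr a =>
        (List.range n).foldl (fun curr b =>
          let ok := (List.range' 1 w).all (fun j =>
            ((((a >>> (j-1)) &&& 1) + ((a >>> j) &&& 1) + ((b >>> (j-1)) &&& 1) + ((b >>> j) &&& 1) == 1)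
              == (row.getD (j-1) 0 != 0)))
          if ok then curr.set b (curr.getD b 0 + prev.getD a 0) else curr) curr)
        (List.replicate n 0)) (List.replicate n (1 : Int))
  fin.sum

-- ===== PRECONDITION & SPEC =====
-- Pre_ excludes exactly the inputs on which A raises (IndexError): the empty grid, and
-- ragged grids with some row shorter than the first row.
def Pre_solution (g : List (List Int)) : Prop :=
  g ≠ [] ∧ ∀ row ∈ g, g.headI.length ≤ row.length
instance (g : List (List Int)) : Decidable (Pre_solution g) := by unfold Pre_solution; infer_instance
def pvWitness_solution : List (List Int) := [[1, 0], [0, 1]]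

def Spec_solution (g : List (List Int)) (out : Int) : Prop := out = solution_alt g
instance (g : List (List Int)) (out : Int) : Decidable (Spec_solution g out) := by unfold Spec_solution; infer_instance

-- ===== CLAIM (what is proved, stated in full; the proofs are below) =====
def Claim_equal_solution : Prop := ∀ (g : List (List Int)), Dom_solution g → Pre_solution g → Spec_solution g (solution g)

-- ===== LEMMAS AND PROOFS =====

lemma pvGetD_set_self (l : List Int) (j : Nat) (v d : Int) (h : j < l.length) :
    (l.set j v).getD j d = v := by
  simp [List.getD, h]

lemma pvGetD_set_ne (l : List Int) (j t : Nat) (v d : Int) (h : j ≠ t) :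
    (l.set j v).getD t d = l.getD t d := by
  simp [List.getD, h]

lemma pvTake_set_succ (l : List Int) (j : Nat) (v : Int) (h : j < l.length) :
    (l.set j v).take (j+1) = l.take j ++ [v] := by
  rw [List.set_eq_take_cons_drop v h]
  have hl : (l.take j).length = j := by simp [Nat.le_of_lt h]
  rw [show j + 1 = (l.take j).length + 1 by rw [hl], List.take_append]
  simp

lemma pvSet_eq_self (l : List Int) (j : Nat) (v d : Int) (h : j < l.length) (hv : l.getD j d = v) :
    l.set j v = l := by
  have hg : l[j] = v := by simpa [List.getD, List.getElem?_eq_getElem h] using hv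
  apply List.ext_getElem (by simp)
  intro i h1 h2
  rcases eq_or_ne i j with rfl | hij
  · simp [hg]
  · simp [Ne.symm hij, hij]

lemma pvGetD_take_append_lt (c y : List Int) (j t : Nat) (d : Int) (h : t < j) (h2 : j ≤ c.length) :
    (c.take j ++ y).getD t d = c.getD t d := by
  simp [List.getD, List.getElem?_append, Nat.lt_of_lt_of_le h h2, List.getElem?_take, h]

lemma pvGetD_take_append_self (c : List Int) (v : Int) (y : List Int) (j : Nat) (d : Int) (h2 : j ≤ c.length) :
    (c.take j ++ v :: y).getD j d = v := by
  have hl : (c.take j).length = j := by simp [h2]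
  rw [List.getD, List.getElem?_append_right (by omega)]
  simp [hl]

def mconv : List Int → Int
  | [] => 0
  | v :: x => v + 2 * mconv x

lemma Aconv_enum_shift (x : List Int) : ∀ (s : Nat),
    ((PySem.List.enumerate x (s : Int)).map (fun p => p.2 * 2 ^ p.1.toNat)).sum = 2 ^ s * mconv x := by
  induction x with
  | nil => intro s; simp [PySem.List.enumerate_nil, mconv]
  | cons v t ih =>
    intro s
    rw [PySem.List.enumerate_cons]
    have hcast : (s : Int) + 1 = ((s + 1 : Nat) : Int) := by push_cast; ring
    simp only [List.map_cons, List.sum_cons, hcast, ih (s + 1), mconv]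
    simp [Int.toNat_natCast, pow_succ]
    ring

lemma Aconv_eq_mconv (x : List Int) : Aconv x = mconv x := by
  have := Aconv_enum_shift x 0
  simpa [Aconv] using this

lemma mconv_bounds (x : List Int) (h : ∀ v ∈ x, v = 0 ∨ v = 1) :
    0 ≤ mconv x ∧ mconv x < 2 ^ x.length := by
  induction x with
  | nil => simp [mconv]
  | cons v t ih =>
    have hv : v = 0 ∨ v = 1 := h v (by simp)
    have ih' := ih (fun u hu => h u (by simp [hu]))
    simp only [mconv, List.length_cons]
    constructor
    · rcases hv with rfl | rfl <;> omega
    · have : (2:Int) ^ (t.length + 1) = 2 * 2 ^ t.length := by ring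
      rcases hv with rfl | rfl <;> omega

def bitsOf : Nat → Nat → List Int
  | 0, _ => []
  | (m+1), a => ((a % 2 : Nat) : Int) :: bitsOf m (a / 2)

def allBits : Nat → List (List Int)
  | 0 => [[]]
  | (m+1) => ([1, 0] : List Int).flatMap (fun v => (allBits m).map (fun x => v :: x))

lemma sum_range_interleave (f : Nat → Int) : ∀ (m : Nat),
    ((List.range (2 * m)).map f).sum = ((List.range m).map (fun a => f (2 * a) + f (2 * a + 1))).sum := by
  intro m
  induction m with
  | zero => simp
  | succ m ih =>
    have h1 : 2 * (m + 1) = (2 * m + 1) + 1 := by ring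
    rw [h1, List.range_succ, List.range_succ, List.range_succ]
    simp only [List.map_append, List.sum_append, ih]
    simp
    ring

lemma sum_allBits : ∀ (m : Nat) (F : List Int → Int),
    ((allBits m).map F).sum = ((List.range (2 ^ m)).map (fun a => F (bitsOf m a))).sum := by
  intro m
  induction m with
  | zero => intro F; simp [allBits, bitsOf]
  | succ m ih =>
    intro F
    have hpow : 2 ^ (m + 1) = 2 * 2 ^ m := by ring
    rw [hpow, sum_range_interleave]
    have h2 : ∀ a : Nat, bitsOf (m+1) (2*a) = 0 :: bitsOf m a := by
      intro a
      simp [bitsOf, Nat.mul_div_cancel_left a (by norm_num : 0 < 2), Nat.mul_mod_right]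
    have h3 : ∀ a : Nat, bitsOf (m+1) (2*a+1) = 1 :: bitsOf m a := by
      intro a
      have : (2*a+1) / 2 = a := by omega
      have h2' : (2*a+1) % 2 = 1 := by omega
      simp [bitsOf, this, h2']
    simp only [allBits, List.flatMap_cons, List.flatMap_nil, List.append_nil,
      List.map_append, List.sum_append, List.map_map]
    simp only [Function.comp_def]
    rw [ih (fun x => F (1 :: x)), ih (fun x => F (0 :: x))]
    have hsplit : ((List.range (2 ^ m)).map (fun a => F (bitsOf (m+1) (2*a)) + F (bitsOf (m+1) (2*a+1)))).sum
        = ((List.range (2 ^ m)).map (fun a => F (0 :: bitsOf m a))).sum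
          + ((List.range (2 ^ m)).map (fun a => F (1 :: bitsOf m a))).sum := by
      rw [← PySem.List.sum_map_add_int]
      apply congrArg
      apply List.map_congr_left
      intro a _
      rw [h2 a, h3 a]
    rw [hsplit]
    ring

lemma mconv_bitsOf : ∀ (m a : Nat), a < 2 ^ m → mconv (bitsOf m a) = ((a % 2 ^ m : Nat) : Int) := by
  intro m
  induction m with
  | zero => intro a _; simp [bitsOf, mconv]
  | succ m ih =>
    intro a ha
    have hlt : a / 2 < 2 ^ m := by
      have : 2 ^ (m+1) = 2 * 2 ^ m := by ring
      omega
    simp only [bitsOf, mconv, ih (a / 2) hlt]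
    have h1 : a % 2 ^ (m+1) = a := Nat.mod_eq_of_lt ha
    have h2 : a / 2 % 2 ^ m = a / 2 := Nat.mod_eq_of_lt hlt
    rw [h1, h2]
    push_cast
    omega

lemma getD_bitsOf : ∀ (m a t : Nat), t < m →
    (bitsOf m a).getD t 0 = (((a >>> t) &&& 1 : Nat) : Int) := by
  intro m
  induction m with
  | zero => intro a t ht; omega
  | succ m ih =>
    intro a t ht
    have hsh : ∀ b s : Nat, b >>> s &&& 1 = b / 2 ^ s % 2 := by
      intro b s
      rw [Nat.shiftRight_eq_div_pow, Nat.and_one_is_mod]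
    cases t with
    | zero => simp [bitsOf, hsh]
    | succ t =>
      have := ih (a / 2) t (by omega)
      simp only [bitsOf, List.getD_cons_succ, this]
      rw [hsh, hsh, Nat.div_div_eq_div_mul]
      congr 2
      rw [pow_succ]
      ring_nf


-- ===== A-side check characterization =====
def AcheckRow (row d0 d1 : List Int) (t : Nat) : Bool :=
  ((d1.getD t 0 + d0.getD t 0 + d1.getD (t-1) 0 + d0.getD (t-1) 0) == (1 : Int))
    == ((row.getD (t-1) 0) != 0)

lemma Acheck_eq_row (gp : List (List Int)) (r : Nat) (c0 c1 : List Int) (j : Nat) :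
    Acheck gp r c0 c1 j = AcheckRow (gp.getD r []) c0 c1 j := by
  unfold Acheck AcheckRow
  cases h1 : ((c1.getD j 0 + c0.getD j 0 + c1.getD (j-1) 0 + c0.getD (j-1) 0) == (1 : Int)) <;>
    cases h2 : (((gp.getD r []).getD (j-1) 0) != 0) <;> simp [h1, h2]

def okRow (row : List Int) (w j : Nat) (d0 d1 : List Int) : Bool :=
  (List.range' j (w + 1 - j)).all (fun t => AcheckRow row d0 d1 t)

lemma okRow_base (row : List Int) (w : Nat) (d0 d1 : List Int) : okRow row w (w+1) d0 d1 = true := by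
  simp [okRow]

lemma okRow_step (row : List Int) (w j : Nat) (d0 d1 : List Int) (h : j ≤ w) :
    okRow row w j d0 d1 = (AcheckRow row d0 d1 j && okRow row w (j+1) d0 d1) := by
  unfold okRow
  have h1 : w + 1 - j = (w - j) + 1 := by omega
  have h2 : w + 1 - (j + 1) = w - j := by omega
  rw [h1, h2, List.range'_succ]
  simp

lemma AcheckRow_take (row c0 c1 x0 x1 : List Int) (v0 v1 : Int) (j : Nat)
    (hj : 1 ≤ j) (h0 : j < c0.length) (h1 : j < c1.length) :
    AcheckRow row (c0.take j ++ v0 :: x0) (c1.take j ++ v1 :: x1) j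
      = AcheckRow row (c0.set j v0) (c1.set j v1) j := by
  unfold AcheckRow
  rw [pvGetD_take_append_self c0 v0 x0 j 0 (Nat.le_of_lt h0),
      pvGetD_take_append_self c1 v1 x1 j 0 (Nat.le_of_lt h1),
      pvGetD_take_append_lt c0 _ j (j-1) 0 (by omega) (Nat.le_of_lt h0),
      pvGetD_take_append_lt c1 _ j (j-1) 0 (by omega) (Nat.le_of_lt h1),
      pvGetD_set_self c0 j v0 0 h0, pvGetD_set_self c1 j v1 0 h1,
      pvGetD_set_ne c0 j (j-1) v0 0 (by omega), pvGetD_set_ne c1 j (j-1) v1 0 (by omega)]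



-- ===== A-side: backtracking = fold over a completion list =====

-- one-step unfolding of Abt (proved once; `rw [Abt]` via equation lemmas is too slow)
set_option maxHeartbeats 2000000 in
lemma Abt_succ (gp : List (List Int)) (w : Nat) (ps : PySem.Dict Int Int) (r : Nat)
    (fuel i j : Nat) (c0 c1 : List Int) (cs : PySem.Dict Int Int) :
    Abt gp w ps r (fuel+1) i j c0 c1 cs =
    (if j = w + 1 then
      let a := Aconv c0
      let b := Aconv c1
      (c0, c1, cs.insert b (cs.getD b 0 + ps.getD a 0))
    else if i = 0 ∧ j = 0 then
      let r1 := Abt gp w ps r fuel 1 0 c0 c1 cs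
      Abt gp w ps r fuel 1 0 (r1.1.set 0 0) r1.2.1 r1.2.2
    else if i = 1 ∧ j = 0 then
      let r1 := Abt gp w ps r fuel 0 1 c0 c1 cs
      let r2 := Abt gp w ps r fuel 0 1 r1.1 (r1.2.1.set 0 0) r1.2.2
      (r2.1, r2.2.1.set 0 1, r2.2.2)
    else if i = 0 then
      let r1 := Abt gp w ps r fuel 1 j c0 c1 cs
      let r2 := Abt gp w ps r fuel 1 j (r1.1.set j 0) r1.2.1 r1.2.2
      (r2.1.set j 1, r2.2.1, r2.2.2)
    else
      let r1 := if Acheck gp r c0 c1 j then Abt gp w ps r fuel 0 (j+1) c0 c1 cs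
                else (c0, c1, cs)
      let r2 := if Acheck gp r r1.1 (r1.2.1.set j 0) j then
                  Abt gp w ps r fuel 0 (j+1) r1.1 (r1.2.1.set j 0) r1.2.2
                else (r1.1, r1.2.1.set j 0, r1.2.2)
      (r2.1, r2.2.1.set j 1, r2.2.2)) := rfl


def dstep (ps : PySem.Dict Int Int) (d : PySem.Dict Int Int) (ab : Int × Int) : PySem.Dict Int Int :=
  d.insert ab.2 (d.getD ab.2 0 + ps.getD ab.1 0)

def compsL (gp : List (List Int)) (r : Nat) : Nat → Nat → List Int → List Int → List (Int × Int)
  | 0, _, c0, c1 => [(Aconv c0, Aconv c1)]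
  | (k+1), j, c0, c1 =>
      ((if Acheck gp r c0 c1 j then compsL gp r k (j+1) c0 c1 else []) ++
       (if Acheck gp r c0 (c1.set j 0) j then compsL gp r k (j+1) c0 (c1.set j 0) else [])) ++
      ((if Acheck gp r (c0.set j 0) c1 j then compsL gp r k (j+1) (c0.set j 0) c1 else []) ++
       (if Acheck gp r (c0.set j 0) (c1.set j 0) j then compsL gp r k (j+1) (c0.set j 0) (c1.set j 0) else []))

set_option maxHeartbeats 1600000 in
lemma Abt1_spec (gp : List (List Int)) (w : Nat) (ps : PySem.Dict Int Int) (r k j : Nat)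
    (c0 c1 : List Int) (cs : PySem.Dict Int Int) (fuel : Nat)
    (IH : ∀ (c0 c1 : List Int) (cs : PySem.Dict Int Int) (fuel : Nat),
      (j+1) + k = w + 1 → 1 ≤ j + 1 → c0.length = w + 1 → c1.length = w + 1 →
      (∀ t, j + 1 ≤ t → t ≤ w → c0.getD t 0 = 1) → (∀ t, j + 1 ≤ t → t ≤ w → c1.getD t 0 = 1) →
      2 * k + 2 ≤ fuel →
      Abt gp w ps r fuel 0 (j+1) c0 c1 cs = (c0, c1, (compsL gp r k (j+1) c0 c1).foldl (dstep ps) cs))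
    (hjk : j + (k + 1) = w + 1) (hj : 1 ≤ j)
    (hl0 : c0.length = w + 1) (hl1 : c1.length = w + 1)
    (hs0 : ∀ t, j + 1 ≤ t → t ≤ w → c0.getD t 0 = 1) (hs1 : ∀ t, j ≤ t → t ≤ w → c1.getD t 0 = 1)
    (hf : 2 * k + 3 ≤ fuel) :
    Abt gp w ps r fuel 1 j c0 c1 cs = (c0, c1,
      ((if Acheck gp r c0 c1 j then compsL gp r k (j+1) c0 c1 else []) ++
       (if Acheck gp r c0 (c1.set j 0) j then compsL gp r k (j+1) c0 (c1.set j 0) else [])).foldl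
        (dstep ps) cs) := by
  obtain ⟨f, rfl⟩ : ∃ f, fuel = f + 1 := ⟨fuel - 1, by omega⟩
  have hjw : ¬ (j = w + 1) := by omega
  have hj0 : ¬ j = 0 := by omega
  have hjlt : j < w + 1 := by omega
  have hcl1 : c1.getD j 0 = 1 := hs1 j (Nat.le_refl j) (by omega)
  have hset0 : ∀ t, j + 1 ≤ t → t ≤ w → (c1.set j 0).getD t 0 = 1 := by
    intro t ht htw
    rw [pvGetD_set_ne c1 j t 0 0 (by omega)]
    exact hs1 t (by omega) htw
  have hrestore : (c1.set j 0).set j 1 = c1 := by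
    rw [List.set_set]
    exact pvSet_eq_self c1 j 1 0 (by omega) hcl1
  have h1 : Abt gp w ps r (f+1) 1 j c0 c1 cs =
      (let r1 := if Acheck gp r c0 c1 j then Abt gp w ps r f 0 (j+1) c0 c1 cs else (c0, c1, cs)
       let r2 := if Acheck gp r r1.1 (r1.2.1.set j 0) j then
                   Abt gp w ps r f 0 (j+1) r1.1 (r1.2.1.set j 0) r1.2.2
                 else (r1.1, r1.2.1.set j 0, r1.2.2)
       (r2.1, r2.2.1.set j 1, r2.2.2)) := by
    rw [Abt_succ]
    rw [if_neg hjw, if_neg (by simp), if_neg (by simp [hj0]), if_neg (by simp)]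
  rw [h1]
  have e1 : (if Acheck gp r c0 c1 j then Abt gp w ps r f 0 (j+1) c0 c1 cs else (c0, c1, cs))
      = (c0, c1, (if Acheck gp r c0 c1 j then compsL gp r k (j+1) c0 c1 else []).foldl (dstep ps) cs) := by
    cases hA : Acheck gp r c0 c1 j
    · simp
    · simp only [if_pos rfl]
      exact IH c0 c1 cs f (by omega) (by omega) hl0 hl1 hs0 (fun t ht htw => hs1 t (by omega) htw) (by omega)
  rw [e1]
  simp only
  set X1 := (if Acheck gp r c0 c1 j then compsL gp r k (j+1) c0 c1 else []).foldl (dstep ps) cs with hX1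
  have e2 : (if Acheck gp r c0 (c1.set j 0) j then Abt gp w ps r f 0 (j+1) c0 (c1.set j 0) X1
        else (c0, c1.set j 0, X1))
      = (c0, c1.set j 0, (if Acheck gp r c0 (c1.set j 0) j then compsL gp r k (j+1) c0 (c1.set j 0) else []).foldl (dstep ps) X1) := by
    cases hB : Acheck gp r c0 (c1.set j 0) j
    · simp
    · simp only [if_pos rfl]
      exact IH c0 (c1.set j 0) X1 f (by omega) (by omega) hl0 (by simp [hl1]) hs0 hset0 (by omega)
  rw [e2]
  simp only [hrestore]
  rw [List.foldl_append]

set_option maxHeartbeats 1600000 in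
lemma Abt_spec (gp : List (List Int)) (w : Nat) (ps : PySem.Dict Int Int) (r : Nat) :
    ∀ (k j : Nat) (c0 c1 : List Int) (cs : PySem.Dict Int Int) (fuel : Nat),
      j + k = w + 1 → 1 ≤ j → c0.length = w + 1 → c1.length = w + 1 →
      (∀ t, j ≤ t → t ≤ w → c0.getD t 0 = 1) → (∀ t, j ≤ t → t ≤ w → c1.getD t 0 = 1) →
      2 * k + 2 ≤ fuel →
      Abt gp w ps r fuel 0 j c0 c1 cs = (c0, c1, (compsL gp r k j c0 c1).foldl (dstep ps) cs) := by
  intro k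
  induction k with
  | zero =>
    intro j c0 c1 cs fuel hjk hj hl0 hl1 hs0 hs1 hf
    obtain ⟨f, rfl⟩ : ∃ f, fuel = f + 1 := ⟨fuel - 1, by omega⟩
    have hjw : j = w + 1 := by omega
    subst hjw
    rw [Abt_succ, if_pos rfl]
    simp [compsL, dstep]
  | succ k ih =>
    intro j c0 c1 cs fuel hjk hj hl0 hl1 hs0 hs1 hf
    obtain ⟨f, rfl⟩ : ∃ f, fuel = f + 1 := ⟨fuel - 1, by omega⟩
    have hjw : ¬ (j = w + 1) := by omega
    have hj0 : ¬ j = 0 := by omega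
    have hc0j : c0.getD j 0 = 1 := hs0 j (Nat.le_refl j) (by omega)
    have h1 : Abt gp w ps r (f+1) 0 j c0 c1 cs =
        (let r1 := Abt gp w ps r f 1 j c0 c1 cs
         let r2 := Abt gp w ps r f 1 j (r1.1.set j 0) r1.2.1 r1.2.2
         (r2.1.set j 1, r2.2.1, r2.2.2)) := by
      rw [Abt_succ]
      rw [if_neg hjw, if_neg (by simp [hj0]), if_neg (by simp), if_pos rfl]
    rw [h1]
    have hIH : ∀ (c0 c1 : List Int) (cs : PySem.Dict Int Int) (fuel : Nat),
        (j+1) + k = w + 1 → 1 ≤ j + 1 → c0.length = w + 1 → c1.length = w + 1 →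
        (∀ t, j + 1 ≤ t → t ≤ w → c0.getD t 0 = 1) → (∀ t, j + 1 ≤ t → t ≤ w → c1.getD t 0 = 1) →
        2 * k + 2 ≤ fuel →
        Abt gp w ps r fuel 0 (j+1) c0 c1 cs = (c0, c1, (compsL gp r k (j+1) c0 c1).foldl (dstep ps) cs) :=
      fun c0 c1 cs fuel => ih (j+1) c0 c1 cs fuel
    have e1 := Abt1_spec gp w ps r k j c0 c1 cs f hIH (by omega) hj hl0 hl1
      (fun t ht htw => hs0 t (by omega) htw) hs1 (by omega)
    rw [e1]
    simp only
    set X1 := ((if Acheck gp r c0 c1 j then compsL gp r k (j+1) c0 c1 else []) ++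
       (if Acheck gp r c0 (c1.set j 0) j then compsL gp r k (j+1) c0 (c1.set j 0) else [])).foldl
        (dstep ps) cs with hX1
    have e2 := Abt1_spec gp w ps r k j (c0.set j 0) c1 X1 f hIH (by omega) hj (by simp [hl0]) hl1
      (fun t ht htw => by rw [pvGetD_set_ne c0 j t 0 0 (by omega)]; exact hs0 t (by omega) htw) hs1 (by omega)
    rw [e2]
    simp only
    have hrestore : (c0.set j 0).set j 1 = c0 := by
      rw [List.set_set]
      exact pvSet_eq_self c0 j 1 0 (by omega) hc0j
    rw [hrestore]
    rw [compsL, List.foldl_append, List.foldl_append, ← hX1, List.foldl_append]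


-- ===== dict accumulation lemmas =====
lemma getD_foldl_dstep (ps : PySem.Dict Int Int) :
    ∀ (L : List (Int × Int)) (d : PySem.Dict Int Int) (key : Int),
      (L.foldl (dstep ps) d).getD key 0
        = d.getD key 0 + (L.map (fun ab => if ab.2 = key then ps.getD ab.1 0 else 0)).sum := by
  intro L
  induction L with
  | nil => intro d key; simp
  | cons a L ih =>
    intro d key
    rw [List.foldl_cons, ih]
    simp only [List.map_cons, List.sum_cons, dstep, PySem.Dict.getD_insert]
    by_cases h : key = a.2
    · subst h
      rw [if_pos rfl, if_pos rfl]
      ring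
    · rw [if_neg h, if_neg (fun hh => h (Eq.symm hh))]
      ring

lemma keys_foldl_dstep (ps : PySem.Dict Int Int) (L : List (Int × Int)) (d : PySem.Dict Int Int) :
    (L.foldl (dstep ps) d).keys = PySem.Set.update d.keys (L.map (fun ab => ab.2)) := by
  exact PySem.Dict.keys_foldl_insert_key L (fun ab => ab.2)
    (fun d x => d.getD x.2 0 + ps.getD x.1 0) d

lemma nodup_keys_foldl_dstep (ps : PySem.Dict Int Int) (L : List (Int × Int))
    (d : PySem.Dict Int Int) (h : d.keys.Nodup) :
    (L.foldl (dstep ps) d).keys.Nodup := by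
  exact PySem.Dict.nodup_keys_foldl_insert_key L (fun ab => ab.2)
    (fun d x => d.getD x.2 0 + ps.getD x.1 0) d h

lemma mem_set_update (s : List Int) (xs : List Int) (y : Int) :
    y ∈ PySem.Set.update s xs ↔ y ∈ s ∨ y ∈ xs := by
  have h := PySem.Set.mem_foldl_add (l := xs) (f := fun b => b) (s := s) (y := y)
  constructor
  · intro hy
    rcases h.1 hy with h' | ⟨b, hb, rfl⟩
    · exact Or.inl h'
    · exact Or.inr hb
  · intro hy
    apply h.2
    rcases hy with h' | h'
    · exact Or.inl h'
    · exact Or.inr ⟨y, h', rfl⟩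

-- every second component produced by compsL is a number in [0, 2^(w+1))
lemma compsL_snd_bound (gp : List (List Int)) (r w : Nat) :
    ∀ (k j : Nat) (c0 c1 : List Int), c1.length = w + 1 → (∀ v ∈ c1, v = 0 ∨ v = 1) →
      ∀ ab ∈ compsL gp r k j c0 c1, ∃ b : Nat, b < 2 ^ (w+1) ∧ ab.2 = (b : Int) := by
  intro k
  induction k with
  | zero =>
    intro j c0 c1 hl h01 ab hab
    simp only [compsL, List.mem_singleton] at hab
    subst hab
    obtain ⟨hge, hlt⟩ := mconv_bounds c1 h01
    rw [hl] at hlt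
    refine ⟨(mconv c1).toNat, ?_, ?_⟩
    · have : ((2:Int) ^ (w+1)) = ((2 ^ (w+1) : Nat) : Int) := by push_cast; ring
      omega
    · simp [Aconv_eq_mconv, Int.toNat_of_nonneg hge]
  | succ k ih =>
    intro j c0 c1 hl h01 ab hab
    have h01' : ∀ v ∈ c1.set j 0, v = 0 ∨ v = 1 := by
      intro v hv
      rcases List.mem_or_eq_of_mem_set hv with h | h
      · exact h01 v h
      · exact Or.inl h
    simp only [compsL, List.mem_append] at hab
    rcases hab with (hab | hab) | (hab | hab) <;> revert hab <;> split <;> intro hab <;>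
      first
        | exact ih (j+1) _ _ hl h01 ab hab
        | exact ih (j+1) _ _ (by simp [hl]) h01' ab hab
        | simp at hab

-- ===== the pruned enumeration sums to the full filtered double sum =====
set_option maxHeartbeats 1600000 in
lemma sum_compsL (gp : List (List Int)) (r w : Nat) (ps : PySem.Dict Int Int) (key : Int) :
    ∀ (k j : Nat) (c0 c1 : List Int),
      j + k = w + 1 → 1 ≤ j → c0.length = w + 1 → c1.length = w + 1 →
      (∀ t, j ≤ t → t ≤ w → c0.getD t 0 = 1) → (∀ t, j ≤ t → t ≤ w → c1.getD t 0 = 1) →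
      ((compsL gp r k j c0 c1).map (fun ab => if ab.2 = key then ps.getD ab.1 0 else 0)).sum
        = ((allBits k).map (fun x0 => ((allBits k).map (fun x1 =>
            if okRow (gp.getD r []) w j (c0.take j ++ x0) (c1.take j ++ x1) = true
                ∧ Aconv (c1.take j ++ x1) = key
            then ps.getD (Aconv (c0.take j ++ x0)) 0 else 0)).sum)).sum := by
  intro k
  induction k with
  | zero =>
    intro j c0 c1 hjk hj hl0 hl1 hs0 hs1
    have hj' : j = w + 1 := by omega
    subst hj'
    have ht0 : c0.take (w+1) = c0 := by rw [← hl0]; exact List.take_length ..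
    have ht1 : c1.take (w+1) = c1 := by rw [← hl1]; exact List.take_length ..
    simp [compsL, allBits, ht0, ht1, okRow_base]
  | succ k ih =>
    intro j c0 c1 hjk hj hl0 hl1 hs0 hs1
    have hjw : j ≤ w := by omega
    have hjl0 : j < c0.length := by omega
    have hjl1 : j < c1.length := by omega
    have hblock : ∀ (v0 v1 : Int) (d0 d1 : List Int),
        d0 = c0.set j v0 → d1 = c1.set j v1 →
        ((if Acheck gp r d0 d1 j then compsL gp r k (j+1) d0 d1 else []).map
            (fun ab => if ab.2 = key then ps.getD ab.1 0 else 0)).sum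
          = ((allBits k).map (fun x0 => ((allBits k).map (fun x1 =>
              if okRow (gp.getD r []) w j (c0.take j ++ (v0 :: x0)) (c1.take j ++ (v1 :: x1)) = true
                  ∧ Aconv (c1.take j ++ (v1 :: x1)) = key
              then ps.getD (Aconv (c0.take j ++ (v0 :: x0))) 0 else 0)).sum)).sum := by
      intro v0 v1 d0 d1 hd0 hd1
      have h0 : ∀ x0 : List Int, c0.take j ++ (v0 :: x0) = d0.take (j+1) ++ x0 := by
        intro x0; rw [hd0, pvTake_set_succ c0 j v0 hjl0]; simp
      have h1 : ∀ x1 : List Int, c1.take j ++ (v1 :: x1) = d1.take (j+1) ++ x1 := by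
        intro x1; rw [hd1, pvTake_set_succ c1 j v1 hjl1]; simp
      have hsplit : ∀ (x0 x1 : List Int),
          okRow (gp.getD r []) w j (c0.take j ++ (v0 :: x0)) (c1.take j ++ (v1 :: x1))
            = (AcheckRow (gp.getD r []) d0 d1 j
                && okRow (gp.getD r []) w (j+1) (c0.take j ++ (v0 :: x0)) (c1.take j ++ (v1 :: x1))) := by
        intro x0 x1
        rw [okRow_step _ _ _ _ _ hjw, AcheckRow_take (gp.getD r []) c0 c1 x0 x1 v0 v1 j hj hjl0 hjl1,
            ← hd0, ← hd1]
      cases hA : AcheckRow (gp.getD r []) d0 d1 j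
      · have hA' : Acheck gp r d0 d1 j = false := by rw [Acheck_eq_row]; exact hA
        rw [hA']
        simp only [if_neg Bool.false_ne_true, List.map_nil, List.sum_nil]
        symm
        apply List.sum_eq_zero
        intro z hz
        obtain ⟨x0, hx0, rfl⟩ := List.mem_map.1 hz
        apply List.sum_eq_zero
        intro z' hz'
        obtain ⟨x1, hx1, rfl⟩ := List.mem_map.1 hz'
        rw [hsplit x0 x1, hA]
        simp
      · have hA' : Acheck gp r d0 d1 j = true := by rw [Acheck_eq_row]; exact hA
        rw [hA', if_pos rfl]
        have hsfx0 : ∀ t, j + 1 ≤ t → t ≤ w → d0.getD t 0 = 1 := by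
          intro t ht htw; rw [hd0, pvGetD_set_ne c0 j t v0 0 (by omega)]; exact hs0 t (by omega) htw
        have hsfx1 : ∀ t, j + 1 ≤ t → t ≤ w → d1.getD t 0 = 1 := by
          intro t ht htw; rw [hd1, pvGetD_set_ne c1 j t v1 0 (by omega)]; exact hs1 t (by omega) htw
        rw [ih (j+1) d0 d1 (by omega) (by omega) (by rw [hd0]; simp [hl0]) (by rw [hd1]; simp [hl1])
            hsfx0 hsfx1]
        apply congrArg
        apply List.map_congr_left
        intro x0 hx0
        apply congrArg
        apply List.map_congr_left
        intro x1 hx1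
        rw [hsplit x0 x1, hA, Bool.true_and, h0 x0, h1 x1]
    have hgd0 : c0.set j 1 = c0 := pvSet_eq_self c0 j 1 0 hjl0 (hs0 j (Nat.le_refl j) (by omega))
    have hgd1 : c1.set j 1 = c1 := pvSet_eq_self c1 j 1 0 hjl1 (hs1 j (Nat.le_refl j) (by omega))
    rw [compsL]
    simp only [List.map_append, List.sum_append]
    rw [hblock 1 1 c0 c1 hgd0.symm hgd1.symm,
        hblock 1 0 c0 (c1.set j 0) hgd0.symm rfl,
        hblock 0 1 (c0.set j 0) c1 rfl hgd1.symm,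
        hblock 0 0 (c0.set j 0) (c1.set j 0) rfl rfl]
    simp only [allBits, List.flatMap_cons, List.flatMap_nil, List.append_nil, List.map_append,
      List.map_map, List.sum_append, Function.comp_def]
    rw [← PySem.List.sum_map_add_int, ← PySem.List.sum_map_add_int]


-- ===== per-row characterization =====
def Bok (row : List Int) (w a b : Nat) : Bool :=
  (List.range' 1 w).all (fun j =>
    ((((a >>> (j-1)) &&& 1) + ((a >>> j) &&& 1) + ((b >>> (j-1)) &&& 1) + ((b >>> j) &&& 1) == 1)
      == (row.getD (j-1) 0 != 0)))

lemma pvAll_congr {α : Type} (l : List α) (f g : α → Bool) (h : ∀ x ∈ l, f x = g x) :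
    l.all f = l.all g := by
  induction l with
  | nil => rfl
  | cons x t ih =>
    simp only [List.all_cons, h x (by simp), ih (fun y hy => h y (by simp [hy]))]

lemma okRow_bitsOf (row : List Int) (w a b : Nat) :
    okRow row w 1 (bitsOf (w+1) a) (bitsOf (w+1) b) = Bok row w a b := by
  unfold okRow Bok
  have hw : w + 1 - 1 = w := by omega
  rw [hw]
  apply pvAll_congr
  intro j hj
  have hjm := List.mem_range'_1.1 hj
  unfold AcheckRow
  rw [getD_bitsOf (w+1) b j (by omega), getD_bitsOf (w+1) a j (by omega),
      getD_bitsOf (w+1) b (j-1) (by omega), getD_bitsOf (w+1) a (j-1) (by omega)]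
  congr 1
  rw [Bool.eq_iff_iff]
  simp only [beq_iff_eq]
  omega

lemma sum_range_collapse (b : Nat) (P : Nat → Bool) (V : Nat → Int) :
    ∀ (n : Nat), b < n →
    ((List.range n).map (fun x => if P x = true ∧ x = b then V x else 0)).sum
      = if P b = true then V b else 0 := by
  intro n
  induction n with
  | zero => omega
  | succ n ih =>
    intro hb
    rw [List.range_succ]
    simp only [List.map_append, List.sum_append, List.map_cons, List.map_nil, List.sum_cons,
      List.sum_nil, add_zero]
    rcases Nat.lt_or_ge b n with h | h
    · have hne : ¬(P n = true ∧ n = b) := fun ⟨_, hnb⟩ => by omega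
      rw [ih h, if_neg hne]
      ring
    · have hbn : b = n := by omega
      subst hbn
      have hz : ((List.range b).map (fun x => if P x = true ∧ x = b then V x else 0)).sum = 0 := by
        apply List.sum_eq_zero
        intro z hz
        obtain ⟨x, hx, rfl⟩ := List.mem_map.1 hz
        have hxb : x < b := List.mem_range.1 hx
        rw [if_neg (fun hc => by omega)]
      rw [hz]
      by_cases hp : P b = true
      · simp [hp]
      · simp [hp]

def onesG (w : Nat) : List Int := List.replicate (w+1) 1

lemma ones_len (w : Nat) : (onesG w).length = w + 1 := by simp [onesG]

lemma ones_getD (w t : Nat) (ht : t ≤ w) : (onesG w).getD t 0 = 1 := by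
  simp [onesG, List.getD, (by omega : t < w + 1)]

def rowA (gp : List (List Int)) (w : Nat) (ps : PySem.Dict Int Int) (r : Nat) : PySem.Dict Int Int :=
  (Abt gp w ps r (2*w+6) 0 0 (List.replicate (w+1) 1) (List.replicate (w+1) 1) PySem.Dict.empty).2.2

def LtotRow (gp : List (List Int)) (w : Nat) (r : Nat) : List (Int × Int) :=
  compsL gp r w 1 (onesG w) (onesG w) ++ compsL gp r w 1 (onesG w) ((onesG w).set 0 0)
  ++ compsL gp r w 1 ((onesG w).set 0 0) (onesG w)
  ++ compsL gp r w 1 ((onesG w).set 0 0) ((onesG w).set 0 0)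

set_option maxHeartbeats 1600000 in
lemma rowA_eq (gp : List (List Int)) (w : Nat) (ps : PySem.Dict Int Int) (r : Nat) :
    rowA gp w ps r = (LtotRow gp w r).foldl (dstep ps) PySem.Dict.empty := by
  have h10 : ∀ (c0 c1 : List Int) (cs : PySem.Dict Int Int),
      c0.length = w+1 → c1.length = w+1 →
      (∀ t, 1 ≤ t → t ≤ w → c0.getD t 0 = 1) → (∀ t, t ≤ w → c1.getD t 0 = 1) →
      c1.getD 0 0 = 1 →
      Abt gp w ps r (2*w+5) 1 0 c0 c1 cs =
        (c0, c1, (compsL gp r w 1 c0 c1 ++ compsL gp r w 1 c0 (c1.set 0 0)).foldl (dstep ps) cs) := by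
    intro c0 c1 cs hl0 hl1 hs0 hs1 hc10
    rw [show 2*w+5 = (2*w+4)+1 from rfl, Abt_succ]
    rw [if_neg (by omega), if_neg (by simp), if_pos ⟨rfl, rfl⟩]
    rw [Abt_spec gp w ps r w 1 c0 c1 cs (2*w+4) (by omega) (by omega) hl0 hl1
        (fun t ht htw => hs0 t ht htw) (fun t _ htw => hs1 t htw) (by omega)]
    simp only
    rw [Abt_spec gp w ps r w 1 c0 (c1.set 0 0) _ (2*w+4) (by omega) (by omega) hl0 (by simp [hl1])
        (fun t ht htw => hs0 t ht htw)
        (fun t ht htw => by rw [pvGetD_set_ne c1 0 t 0 0 (by omega)]; exact hs1 t htw) (by omega)]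
    simp only
    have hres : (c1.set 0 0).set 0 1 = c1 := by
      rw [List.set_set]; exact pvSet_eq_self c1 0 1 0 (by omega) hc10
    rw [hres, List.foldl_append]
  unfold rowA
  rw [show 2*w+6 = (2*w+5)+1 from rfl, Abt_succ]
  rw [if_neg (by omega), if_pos ⟨rfl, rfl⟩]
  have hOnes : List.replicate (w+1) (1:Int) = onesG w := rfl
  rw [hOnes]
  rw [h10 (onesG w) (onesG w) PySem.Dict.empty (ones_len w) (ones_len w)
      (fun t _ htw => ones_getD w t htw) (fun t htw => ones_getD w t htw) (ones_getD w 0 (by omega))]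
  simp only
  rw [h10 ((onesG w).set 0 0) (onesG w) _ (by simp [ones_len]) (ones_len w)
      (fun t ht htw => by rw [pvGetD_set_ne _ 0 t _ _ (by omega)]; exact ones_getD w t htw)
      (fun t htw => ones_getD w t htw) (ones_getD w 0 (by omega))]
  simp only
  unfold LtotRow
  simp [List.foldl_append]


set_option maxHeartbeats 1600000 in
lemma rowA_getD (gp : List (List Int)) (w : Nat) (ps : PySem.Dict Int Int) (r : Nat) (b : Nat)
    (hb : b < 2^(w+1)) :
    (rowA gp w ps r).getD (b : Int) 0
      = ((List.range (2^(w+1))).map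
          (fun a => if Bok (gp.getD r []) w a b = true then ps.getD (a : Int) 0 else 0)).sum := by
  rw [rowA_eq, getD_foldl_dstep, PySem.Dict.getD_empty, zero_add]
  unfold LtotRow
  simp only [List.map_append, List.sum_append]
  have hones0len : ((onesG w).set 0 0).length = w + 1 := by simp [ones_len]
  have hones0suf : ∀ t, 1 ≤ t → t ≤ w → ((onesG w).set 0 0).getD t 0 = 1 := by
    intro t ht htw; rw [pvGetD_set_ne _ 0 t _ _ (by omega)]; exact ones_getD w t htw
  have hsuf : ∀ t, 1 ≤ t → t ≤ w → (onesG w).getD t 0 = 1 := fun t _ htw => ones_getD w t htw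
  rw [sum_compsL gp r w ps (b:Int) w 1 (onesG w) (onesG w) (by omega) (by omega)
        (ones_len w) (ones_len w) hsuf hsuf,
      sum_compsL gp r w ps (b:Int) w 1 (onesG w) ((onesG w).set 0 0) (by omega) (by omega)
        (ones_len w) hones0len hsuf hones0suf,
      sum_compsL gp r w ps (b:Int) w 1 ((onesG w).set 0 0) (onesG w) (by omega) (by omega)
        hones0len (ones_len w) hones0suf hsuf,
      sum_compsL gp r w ps (b:Int) w 1 ((onesG w).set 0 0) ((onesG w).set 0 0) (by omega) (by omega)
        hones0len hones0len hones0suf hones0suf]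
  have htake1 : (onesG w).take 1 = [(1:Int)] := by
    simp [onesG, List.take_replicate, Nat.min_eq_left (by omega : 1 ≤ w+1)]
  have htake0 : ((onesG w).set 0 0).take 1 = [(0:Int)] := by
    simpa using pvTake_set_succ (onesG w) 0 (0:Int) (by simp [ones_len])
  rw [htake1, htake0]
  simp only [List.singleton_append]
  have inner_eq : ∀ a : Nat, a < 2^(w+1) →
      ((allBits (w+1)).map (fun y1 =>
          if okRow (gp.getD r []) w 1 (bitsOf (w+1) a) y1 = true ∧ Aconv y1 = (b:Int)
          then ps.getD (Aconv (bitsOf (w+1) a)) 0 else 0)).sum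
      = if Bok (gp.getD r []) w a b = true then ps.getD (a:Int) 0 else 0 := by
    intro a ha
    rw [sum_allBits (w+1)]
    have hAa : Aconv (bitsOf (w+1) a) = (a:Int) := by
      rw [Aconv_eq_mconv, mconv_bitsOf (w+1) a ha, Nat.mod_eq_of_lt ha]
    have hmap : ∀ b' ∈ List.range (2^(w+1)),
        (if okRow (gp.getD r []) w 1 (bitsOf (w+1) a) (bitsOf (w+1) b') = true
            ∧ Aconv (bitsOf (w+1) b') = (b:Int)
         then ps.getD (Aconv (bitsOf (w+1) a)) 0 else 0)
        = (if Bok (gp.getD r []) w a b' = true ∧ b' = b then ps.getD (a:Int) 0 else 0) := by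
      intro b' hb'
      have hb'lt := List.mem_range.1 hb'
      have hAb : Aconv (bitsOf (w+1) b') = (b':Int) := by
        rw [Aconv_eq_mconv, mconv_bitsOf (w+1) b' hb'lt, Nat.mod_eq_of_lt hb'lt]
      rw [okRow_bitsOf, hAa, hAb]
      exact if_congr (and_congr Iff.rfl Nat.cast_inj) rfl rfl
    rw [List.map_congr_left hmap]
    exact sum_range_collapse b (fun x => Bok (gp.getD r []) w a x)
      (fun _ => ps.getD (a:Int) 0) (2^(w+1)) hb
  have key : ((List.range (2^(w+1))).map
        (fun a => if Bok (gp.getD r []) w a b = true then ps.getD (a : Int) 0 else 0)).sum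
      = ((allBits (w+1)).map (fun y0 => ((allBits (w+1)).map (fun y1 =>
          if okRow (gp.getD r []) w 1 y0 y1 = true ∧ Aconv y1 = (b:Int)
          then ps.getD (Aconv y0) 0 else 0)).sum)).sum := by
    rw [sum_allBits (w+1)]
    symm
    apply congrArg
    apply List.map_congr_left
    intro a ha
    exact inner_eq a (List.mem_range.1 ha)
  rw [key]
  simp only [allBits, List.flatMap_cons, List.flatMap_nil, List.append_nil, List.map_append,
    List.map_map, List.sum_append, Function.comp_def]
  rw [PySem.List.sum_map_add_int, PySem.List.sum_map_add_int]
  ring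


-- ===== B-side loop characterization =====
def rowB (row : List Int) (w : Nat) (prev : List Int) : List Int :=
  (List.range (2^(w+1))).foldl (fun curr a =>
    (List.range (2^(w+1))).foldl (fun curr b =>
      if Bok row w a b then curr.set b (curr.getD b 0 + prev.getD a 0) else curr) curr)
    (List.replicate (2^(w+1)) 0)

lemma inner_fold (p : Int) (q : Nat → Bool) :
    ∀ (lb : List Nat) (curr : List Int), lb.Nodup → (∀ x ∈ lb, x < curr.length) →
      (∀ t : Nat,
        (lb.foldl (fun c b => if q b then c.set b (c.getD b 0 + p) else c) curr).getD t 0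
          = curr.getD t 0 + if t ∈ lb ∧ q t = true then p else 0)
      ∧ (lb.foldl (fun c b => if q b then c.set b (c.getD b 0 + p) else c) curr).length
          = curr.length := by
  intro lb
  induction lb with
  | nil => intro curr _ _; exact ⟨fun t => by simp, rfl⟩
  | cons b0 lb ih =>
    intro curr hnd hlt
    have hb0 : b0 < curr.length := hlt b0 (by simp)
    have hnd' : lb.Nodup := (List.nodup_cons.1 hnd).2
    have hb0nm : b0 ∉ lb := (List.nodup_cons.1 hnd).1
    have hlen' : (if q b0 then curr.set b0 (curr.getD b0 0 + p) else curr).length = curr.length := by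
      split <;> simp
    have hlt' : ∀ x ∈ lb, x < (if q b0 then curr.set b0 (curr.getD b0 0 + p) else curr).length :=
      fun x hx => hlen' ▸ hlt x (by simp [hx])
    obtain ⟨ihg, ihl⟩ := ih (if q b0 then curr.set b0 (curr.getD b0 0 + p) else curr) hnd' hlt'
    constructor
    · intro t
      rw [List.foldl_cons, ihg t]
      by_cases ht : t = b0
      · subst ht
        have hnm : ¬ (t ∈ lb ∧ q t = true) := fun hc => hb0nm hc.1
        rw [if_neg hnm, add_zero]
        cases hq : q t
        · simp [hq]
        · rw [if_pos rfl, pvGetD_set_self curr t _ 0 hb0]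
          simp [hq]
      · have hc' : (if q b0 then curr.set b0 (curr.getD b0 0 + p) else curr).getD t 0
            = curr.getD t 0 := by
          split
          · exact pvGetD_set_ne curr b0 t _ 0 (fun h => ht h.symm)
          · rfl
        rw [hc']
        have hmem : (t ∈ b0 :: lb ∧ q t = true) ↔ (t ∈ lb ∧ q t = true) := by
          simp [List.mem_cons, ht]
        by_cases hm : t ∈ lb ∧ q t = true
        · rw [if_pos hm, if_pos (hmem.2 hm)]
        · rw [if_neg hm, if_neg (fun hc => hm (hmem.1 hc))]
    · rw [List.foldl_cons, ihl, hlen']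

lemma outer_fold (prev row : List Int) (w n : Nat) :
    ∀ (la : List Nat) (curr : List Int), curr.length = n →
      (∀ t : Nat, t < n →
        (la.foldl (fun c a => (List.range n).foldl
            (fun c b => if Bok row w a b then c.set b (c.getD b 0 + prev.getD a 0) else c) c)
            curr).getD t 0
          = curr.getD t 0 + (la.map (fun a => if Bok row w a t = true then prev.getD a 0 else 0)).sum)
      ∧ (la.foldl (fun c a => (List.range n).foldl
            (fun c b => if Bok row w a b then c.set b (c.getD b 0 + prev.getD a 0) else c) c)
            curr).length = n := by
  intro la
  induction la with
  | nil => intro curr hlen; exact ⟨fun t _ => by simp, hlen⟩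
  | cons a la ih =>
    intro curr hlen
    obtain ⟨ig, il⟩ := inner_fold (prev.getD a 0) (Bok row w a) (List.range n) curr
      (List.nodup_range) (fun x hx => hlen ▸ List.mem_range.1 hx)
    obtain ⟨ihg, ihl⟩ := ih _ (il.trans hlen)
    constructor
    · intro t ht
      rw [List.foldl_cons, ihg t ht, ig t]
      have : (t ∈ List.range n ∧ Bok row w a t = true) ↔ Bok row w a t = true := by
        simp [List.mem_range, ht]
      simp only [List.map_cons, List.sum_cons]
      by_cases hq : Bok row w a t = true
      · rw [if_pos (this.2 hq), if_pos hq]; ring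
      · rw [if_neg (fun hc => hq (this.1 hc)), if_neg hq]; ring
    · rw [List.foldl_cons, ihl]

lemma rowB_getD (row : List Int) (w : Nat) (prev : List Int) (b : Nat) (hb : b < 2^(w+1)) :
    (rowB row w prev).getD b 0
      = ((List.range (2^(w+1))).map
          (fun a => if Bok row w a b = true then prev.getD a 0 else 0)).sum := by
  obtain ⟨hg, _⟩ := outer_fold prev row w (2^(w+1)) (List.range (2^(w+1)))
    (List.replicate (2^(w+1)) 0) (by simp)
  rw [rowB, hg b hb]
  simp [List.getD, hb]

lemma rowB_len (row : List Int) (w : Nat) (prev : List Int) :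
    (rowB row w prev).length = 2^(w+1) :=
  (outer_fold prev row w (2^(w+1)) (List.range (2^(w+1)))
    (List.replicate (2^(w+1)) 0) (by simp)).2

-- ===== initial states =====
def ps0D (n : Nat) : PySem.Dict Int Int :=
  (List.range n).foldl (fun d k => d.insert ((k : Nat) : Int) 1) PySem.Dict.empty

lemma castRange_nodup (n : Nat) : ((List.range n).map (fun b => ((b : Nat) : Int))).Nodup :=
  List.Nodup.map (fun a b h => Nat.cast_inj.mp h) (List.nodup_range)

lemma ps0D_items (n : Nat) :
    (ps0D n).items = (List.range n).map (fun k => (((k : Nat) : Int), (1 : Int))) := by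
  have h := PySem.Dict.items_foldl_insert_fresh (l := List.range n)
    (k := fun k => ((k : Nat) : Int)) (v := fun _ => (1 : Int)) (d := PySem.Dict.empty)
    (fun a _ => PySem.Dict.contains_empty _) (castRange_nodup n)
  simpa [ps0D] using h

lemma ps0D_keys (n : Nat) : (ps0D n).keys = (List.range n).map (fun b => ((b : Nat) : Int)) := by
  simp only [PySem.Dict.keys, ps0D_items, List.map_map]
  rfl

lemma ps0D_getD (n b : Nat) (hb : b < n) : (ps0D n).getD ((b : Nat) : Int) 0 = 1 := by
  apply PySem.Dict.getD_of_mem_items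
  · rw [ps0D_items]
    exact List.mem_map.2 ⟨b, List.mem_range.2 hb, rfl⟩
  · rw [ps0D_keys]
    exact castRange_nodup n

-- ===== the row invariant =====
def InvPB (n : Nat) (ps : PySem.Dict Int Int) (prev : List Int) : Prop :=
  prev.length = n ∧ ps.keys.Nodup ∧ (∀ k ∈ ps.keys, ∃ b : Nat, b < n ∧ k = ((b : Nat) : Int)) ∧
  (∀ b : Nat, b < n → ps.getD ((b : Nat) : Int) 0 = prev.getD b 0)

lemma InvPB_init (n : Nat) : InvPB n (ps0D n) (List.replicate n 1) := by
  refine ⟨by simp, ?_, ?_, ?_⟩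
  · rw [ps0D_keys]; exact castRange_nodup n
  · intro k hk
    rw [ps0D_keys] at hk
    obtain ⟨b, hb, rfl⟩ := List.mem_map.1 hk
    exact ⟨b, List.mem_range.1 hb, rfl⟩
  · intro b hb
    rw [ps0D_getD n b hb]
    simp [List.getD, hb]

lemma ones_entries (w : Nat) : ∀ v ∈ onesG w, v = 0 ∨ v = 1 := by
  intro v hv
  exact Or.inr (List.eq_of_mem_replicate hv)

lemma ones0_entries (w : Nat) : ∀ v ∈ (onesG w).set 0 0, v = 0 ∨ v = 1 := by
  intro v hv
  rcases List.mem_or_eq_of_mem_set hv with h | h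
  · exact ones_entries w v h
  · exact Or.inl h

lemma rowA_keys_bound (gp : List (List Int)) (w : Nat) (ps : PySem.Dict Int Int) (r : Nat) :
    (∀ k ∈ (rowA gp w ps r).keys, ∃ b : Nat, b < 2^(w+1) ∧ k = ((b : Nat) : Int))
      ∧ (rowA gp w ps r).keys.Nodup := by
  rw [rowA_eq]
  constructor
  · intro k hk
    rw [keys_foldl_dstep, PySem.Dict.keys_empty] at hk
    rcases (mem_set_update _ _ _).1 hk with h | h
    · simp at h
    · obtain ⟨ab, hab, rfl⟩ := List.mem_map.1 h
      unfold LtotRow at hab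
      rcases List.mem_append.1 hab with hab | hab
      · rcases List.mem_append.1 hab with hab | hab
        · rcases List.mem_append.1 hab with hab | hab
          · exact compsL_snd_bound gp r w w 1 _ _ (ones_len w) (ones_entries w) ab hab
          · exact compsL_snd_bound gp r w w 1 _ _ (by simp [ones_len]) (ones0_entries w) ab hab
        · exact compsL_snd_bound gp r w w 1 _ _ (ones_len w) (ones_entries w) ab hab
      · exact compsL_snd_bound gp r w w 1 _ _ (by simp [ones_len]) (ones0_entries w) ab hab
  · exact nodup_keys_foldl_dstep ps _ _ PySem.Dict.nodup_keys_empty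

lemma InvPB_step (gp : List (List Int)) (w : Nat) (r : Nat) (ps : PySem.Dict Int Int)
    (prev : List Int) (h : InvPB (2^(w+1)) ps prev) :
    InvPB (2^(w+1)) (rowA gp w ps r) (rowB (gp.getD r []) w prev) := by
  obtain ⟨hlen, hnd, hkb, hged⟩ := h
  refine ⟨rowB_len _ _ _, (rowA_keys_bound gp w ps r).2, (rowA_keys_bound gp w ps r).1, ?_⟩
  intro b hb
  rw [rowA_getD gp w ps r b hb, rowB_getD (gp.getD r []) w prev b hb]
  apply congrArg
  apply List.map_congr_left
  intro a ha
  rw [hged a (List.mem_range.1 ha)]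

lemma map_range_getD {α : Type} (l : List α) (d : α) :
    (List.range l.length).map (fun i => l.getD i d) = l := by
  apply List.ext_getElem (by simp)
  intro i h1 h2
  simp [List.getD, List.getElem?_eq_getElem h2]

lemma InvPB_sum (n : Nat) (ps : PySem.Dict Int Int) (prev : List Int) (h : InvPB n ps prev) :
    ps.values.sum = prev.sum := by
  obtain ⟨hlen, hnd, hks, hged⟩ := h
  rw [PySem.Dict.values_eq_map_keys ps hnd 0]
  rw [← List.sum_toFinset _ hnd]
  have hsub : ps.keys.toFinset ⊆ ((List.range n).map (fun b => ((b : Nat) : Int))).toFinset := by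
    intro x hx
    rw [List.mem_toFinset] at hx ⊢
    obtain ⟨b, hb, rfl⟩ := hks x hx
    exact List.mem_map.2 ⟨b, List.mem_range.2 hb, rfl⟩
  rw [Finset.sum_subset hsub (fun x _ hnx => ?_)]
  · rw [List.sum_toFinset _ (castRange_nodup n), List.map_map]
    have hcg : (List.range n).map ((fun k => ps.getD k 0) ∘ fun b => ((b : Nat) : Int))
        = (List.range n).map (fun b => prev.getD b 0) := by
      apply List.map_congr_left
      intro b hb
      exact hged b (List.mem_range.1 hb)
    rw [hcg, ← hlen, map_range_getD]
  · rw [List.mem_toFinset] at hnx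
    apply PySem.Dict.getD_of_not_contains
    cases hcon : ps.contains x
    · rfl
    · exact absurd ((PySem.Dict.contains_iff_mem_keys ps x).1 hcon) hnx

lemma foldl_rel {α β ι : Type} (Inv : α → β → Prop) (fA : α → ι → α) (fB : β → ι → β)
    (hstep : ∀ i x y, Inv x y → Inv (fA x i) (fB y i)) :
    ∀ (l : List ι) (x : α) (y : β), Inv x y → Inv (l.foldl fA x) (l.foldl fB y) := by
  intro l
  induction l with
  | nil => intro x y h; exact h
  | cons i t ih => intro x y h; exact ih _ _ (hstep i x y h)

lemma gp_eq (g : List (List Int)) (hpre : Pre_solution g) :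
    (if g.headI.length > g.length then
        (List.range ((g.map List.length).min?.getD 0)).map (fun j => g.map (fun row => row.getD j 0))
      else g)
    = (if g.headI.length > g.length then
        (List.range g.headI.length).map
          (fun j => (List.range g.length).map (fun i => (g.getD i []).getD j 0))
      else g) := by
  by_cases hbr : g.headI.length > g.length
  · simp only [if_pos hbr]
    have hmin : (g.map List.length).min? = some (g.headI.length) := by
      rw [List.min?_eq_some_iff]
      constructor
      · obtain ⟨r, t, rfl⟩ : ∃ r t, g = r :: t := by
          rcases g with _ | ⟨r, t⟩
          · exact absurd rfl hpre.1
          · exact ⟨r, t, rfl⟩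
        simp [List.headI]
      · intro b hb
        obtain ⟨row, hrow, rfl⟩ := List.mem_map.1 hb
        exact hpre.2 row hrow
    rw [hmin]
    simp only [Option.getD_some]
    apply List.map_congr_left
    intro j hj
    rw [show g.map (fun row => row.getD j 0)
        = ((List.range g.length).map (fun i => g.getD i [])).map (fun row => row.getD j 0) from by
      rw [map_range_getD]]
    rw [List.map_map]
    simp [Function.comp_def]
  · simp [hbr]

-- ===== VERDICT (by name: the statement is the Claim_ definition above) =====
set_option maxHeartbeats 2000000 in
theorem solution_spec : Claim_equal_solution := by
  intro g hdom hpre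
  show solution g = solution_alt g
  set gpA := (if g.headI.length > g.length then
      (List.range g.headI.length).map
        (fun j => (List.range g.length).map (fun i => (g.getD i []).getD j 0))
    else g) with hgpadef
  have hgpB : (if g.headI.length > g.length then
      (List.range ((g.map List.length).min?.getD 0)).map (fun j => g.map (fun row => row.getD j 0))
    else g) = gpA := gp_eq g hpre
  have hA : solution g =
      ((List.range gpA.length).foldl (fun ps i => rowA gpA (gpA.headI.length) ps i)
        (ps0D (2^(gpA.headI.length+1)))).values.sum := rfl
  have hB : solution_alt g =
      ((if g.headI.length > g.length then
          (List.range ((g.map List.length).min?.getD 0)).map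
            (fun j => g.map (fun row => row.getD j 0))
        else g).foldl
        (fun prev row => rowB row ((if g.headI.length > g.length then
          (List.range ((g.map List.length).min?.getD 0)).map
            (fun j => g.map (fun row => row.getD j 0))
        else g).headI.length) prev)
        (List.replicate (2^(((if g.headI.length > g.length then
          (List.range ((g.map List.length).min?.getD 0)).map
            (fun j => g.map (fun row => row.getD j 0))
        else g).headI.length)+1)) 1)).sum := rfl
  rw [hgpB] at hB
  have hfold : ∀ (l : List (List Int)) (F : List Int → List Int → List Int) (init : List Int),
      l.foldl (fun prev row => F prev row) init
        = (List.range l.length).foldl (fun prev i => F prev (l.getD i [])) init := by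
    intro l F init
    conv_lhs => rw [← map_range_getD l []]
    rw [List.foldl_map]
  rw [hA, hB, hfold gpA (fun prev row => rowB row gpA.headI.length prev) _]
  exact InvPB_sum _ _ _
    (foldl_rel (InvPB (2^(gpA.headI.length+1)))
      (fun ps i => rowA gpA (gpA.headI.length) ps i)
      (fun prev i => rowB (gpA.getD i []) (gpA.headI.length) prev)
      (fun i ps prev h => InvPB_step gpA (gpA.headI.length) i ps prev h)
      (List.range gpA.length) _ _ (InvPB_init (2^(gpA.headI.length+1))))
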